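-- pv_equiv track=rewrite | github.com/blaisethom/email-manager | email-analyser/src/email_manager/analysis/discussions.py | _dedup_against_previous
-- ===== SOURCE A (Python) =====
-- def _dedup_against_previous(body: str, previous_bodies: list[str], min_dup_lines: int = 3) -> str:
--     """Remove runs of lines that appeared in previous emails in the thread.
--
--     Catches cases where the quoted text has no '>' markers (plain copy-paste).
--     Only removes consecutive runs of `min_dup_lines` or more matching lines.
--     """
--     if not body or not previous_bodies:
--         return body
--
--     # Build set of normalised lines from all previous emails
--     prev_lines: set[str] = set()
--     for pb in previous_bodies:
--         for line in pb.split("\n"):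
--             norm = line.strip().lower()
--             if len(norm) > 20:  # Only dedup substantial lines
--                 prev_lines.add(norm)
--
--     lines = body.split("\n")
--     # Mark each line as duplicate or not
--     is_dup = [line.strip().lower() in prev_lines for line in lines]
--
--     # Only remove consecutive runs of min_dup_lines or more
--     result: list[str] = []
--     run_start = 0
--     i = 0
--     while i < len(lines):
--         if is_dup[i]:
--             run_start = i
--             while i < len(lines) and is_dup[i]:
--                 i += 1
--             run_len = i - run_start
--             if run_len < min_dup_lines:
--                 # Short run — keep it (likely a coincidence)
--                 result.extend(lines[run_start:i])
--             # else: drop the whole run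
--         else:
--             result.append(lines[i])
--             i += 1
--
--     # Strip trailing blank lines
--     while result and result[-1].strip() == "":
--         result.pop()
--
--     return "\n".join(result)
-- ===== SOURCE B (Python) =====
-- def _dedup_against_previous(body: str, previous_bodies: list[str], min_dup_lines: int = 3) -> str:
--     """Single pass with a pending-run buffer: no is_dup array, no index arithmetic."""
--     if not body or not previous_bodies:
--         return body
--
--     prev_lines: set[str] = set()
--     for pb in previous_bodies:
--         for line in pb.split("\n"):
--             norm = line.strip().lower()
--             if len(norm) > 20:
--                 prev_lines.add(norm)
--
--     out: list[str] = []
--     run: list[str] = []  # current consecutive run of duplicate lines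
--     for line in body.split("\n"):
--         if line.strip().lower() in prev_lines:
--             run.append(line)
--         else:
--             if len(run) < min_dup_lines:
--                 out.extend(run)  # short run: keep it
--             run = []
--             out.append(line)
--     if len(run) < min_dup_lines:
--         out.extend(run)
--
--     while out and out[-1].strip() == "":
--         out.pop()
--
--     return "\n".join(out)
-- ===== Notes on version B (the rewrite author's own statement) =====
-- stated objective: simpler
-- what changed: Replaced the is_dup boolean array plus the index-based while loop with inner run-scanning by a single structural pass over the lines that carries the current duplicate run in a buffer and flushes it when a non-duplicate line (or the end) is reached.
import Mathlib
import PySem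

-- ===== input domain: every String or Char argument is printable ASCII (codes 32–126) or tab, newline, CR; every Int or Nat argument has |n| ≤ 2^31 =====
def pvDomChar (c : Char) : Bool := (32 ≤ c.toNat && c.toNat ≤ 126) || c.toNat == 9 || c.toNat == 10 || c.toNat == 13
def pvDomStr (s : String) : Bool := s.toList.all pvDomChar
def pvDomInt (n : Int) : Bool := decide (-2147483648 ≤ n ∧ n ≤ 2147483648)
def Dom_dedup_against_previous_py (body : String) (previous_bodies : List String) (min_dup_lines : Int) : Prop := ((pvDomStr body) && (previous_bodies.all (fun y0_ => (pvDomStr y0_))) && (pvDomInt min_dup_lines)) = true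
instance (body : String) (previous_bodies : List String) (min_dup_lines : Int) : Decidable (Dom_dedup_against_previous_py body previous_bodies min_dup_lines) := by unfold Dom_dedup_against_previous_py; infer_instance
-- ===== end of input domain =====

-- B replaces A's is_dup array + index-based while loop by one structural pass carrying the
-- current duplicate run in a buffer (objective: simpler; same O(n) cost; return value only).

-- ===== PORT A =====
-- helpers shared by both ports: the line split, normalisation, set-building and
-- trailing-blank stripping are textually identical in the two Pythons.

-- s.split("\n")  (split? is none only for an empty separator; "\n" is not empty)
def pvSplitNL (s : String) : List String := (PySem.Str.split? s "\n").getD []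

-- line.strip().lower()
def pvNorm (line : String) : String := PySem.Str.lower (PySem.Str.strip line)

-- the prev_lines set built from all previous bodies (identical code in A and B)
def pvPrevLines (previous_bodies : List String) : PySem.Set String :=
  previous_bodies.foldl (fun s pb =>
    (pvSplitNL pb).foldl (fun s line =>
      if 20 < PySem.Str.len (pvNorm line) then PySem.Set.add s (pvNorm line) else s) s)
    PySem.Set.empty

-- trailing-blank strip: while result and result[-1].strip() == "": result.pop()
def pvStripTrail (res : List String) : List String :=
  if h : res ≠ [] then
    if PySem.Str.strip (res.getLast h) = "" then pvStripTrail res.dropLast else res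
  else res
termination_by res.length
decreasing_by
  simp only [List.length_dropLast]
  have := List.length_pos_of_ne_nil h
  omega

-- inner while: while i < len(lines) and is_dup[i]: i += 1
def pvSkip (isdup : List Bool) (i : Nat) : Nat :=
  if i < isdup.length ∧ isdup.getD i false = true then pvSkip isdup (i + 1) else i
termination_by isdup.length - i
decreasing_by omega

-- pvSkip never moves backwards (termination facts for pvALoop, cited by name there)
theorem pvSkip_ge (isdup : List Bool) (i : Nat) : i ≤ pvSkip isdup i := by
  rw [pvSkip]
  split
  · exact Nat.le_trans (Nat.le_succ i) (pvSkip_ge isdup (i + 1))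
  · exact Nat.le_refl i
termination_by isdup.length - i
decreasing_by omega

theorem pvSkip_gt (isdup : List Bool) (i : Nat) (h : isdup.getD i false = true) :
    i < pvSkip isdup i := by
  have hi : i < isdup.length := by
    by_contra hn
    rw [List.getD_eq_default _ _ (by omega)] at h
    exact Bool.false_ne_true h
  rw [pvSkip, if_pos ⟨hi, h⟩]
  exact Nat.lt_of_lt_of_le (Nat.lt_succ_self i) (pvSkip_ge isdup (i + 1))

-- A's outer while loop over indices (j = the i after the inner while, run_len = j - i)
def pvALoop (lines : List String) (isdup : List Bool) (min_dup_lines : Int)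
    (i : Nat) (result : List String) : List String :=
  if h : i < lines.length then
    if hd : isdup.getD i false = true then
      pvALoop lines isdup min_dup_lines (pvSkip isdup i)
        (if ((pvSkip isdup i - i : Nat) : Int) < min_dup_lines then
          result ++ PySem.List.slice lines (some (i : Int)) (some ((pvSkip isdup i : Nat) : Int))
        else result)
    else
      pvALoop lines isdup min_dup_lines (i + 1) (result ++ [lines[i]])
  else result
termination_by lines.length - i
decreasing_by
  · have := pvSkip_gt isdup i hd; omega
  · omega

def dedup_against_previous_py (body : String) (previous_bodies : List String) (min_dup_lines : Int) : String :=
  if body = "" ∨ previous_bodies = [] then body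
  else
    PySem.Str.join "\n"
      (pvStripTrail
        (pvALoop (pvSplitNL body)
          ((pvSplitNL body).map
            (fun line => PySem.Set.contains (pvPrevLines previous_bodies) (pvNorm line)))
          min_dup_lines 0 []))

-- ===== PORT B =====
-- B's single pass with the pending duplicate-run buffer
def pvBLoop (prev : PySem.Set String) (min_dup_lines : Int)
    (out run : List String) : List String → List String
  | [] => if (run.length : Int) < min_dup_lines then out ++ run else out
  | line :: rest =>
    if PySem.Set.contains prev (pvNorm line) then
      pvBLoop prev min_dup_lines out (run ++ [line]) rest
    else
      pvBLoop prev min_dup_lines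
        ((if (run.length : Int) < min_dup_lines then out ++ run else out) ++ [line]) [] rest

def dedup_against_previous_py_alt (body : String) (previous_bodies : List String) (min_dup_lines : Int) : String :=
  if body = "" ∨ previous_bodies = [] then body
  else
    PySem.Str.join "\n"
      (pvStripTrail
        (pvBLoop (pvPrevLines previous_bodies) min_dup_lines [] [] (pvSplitNL body)))

-- ===== PRECONDITION & SPEC =====
def Spec_dedup_against_previous_py (body : String) (previous_bodies : List String) (min_dup_lines : Int) (out : String) : Prop := out = dedup_against_previous_py_alt body previous_bodies min_dup_lines
instance (body : String) (previous_bodies : List String) (min_dup_lines : Int) (out : String) : Decidable (Spec_dedup_against_previous_py body previous_bodies min_dup_lines out) := by unfold Spec_dedup_against_previous_py; infer_instance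

-- ===== CLAIM (what is proved, stated in full; the proofs are below) =====
def Claim_equal_dedup_against_previous_py : Prop := ∀ (body : String) (previous_bodies : List String) (min_dup_lines : Int), Dom_dedup_against_previous_py body previous_bodies min_dup_lines → Spec_dedup_against_previous_py body previous_bodies min_dup_lines (dedup_against_previous_py body previous_bodies min_dup_lines)

-- ===== LEMMAS AND PROOFS =====

-- dropWhile as a drop (general List fact; exact?/simp? find no Mathlib lemma for it)
theorem pvDropWhile_eq_drop (f : String → Bool) (xs : List String) :
    xs.dropWhile f = xs.drop (xs.takeWhile f).length := by
  conv_lhs => rw [show xs.dropWhile f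
    = (xs.takeWhile f ++ xs.dropWhile f).drop (xs.takeWhile f).length from (List.drop_left).symm]
  rw [List.takeWhile_append_dropWhile]

-- common middle form of both loops: process maximal duplicate runs structurally
def pvCore (f : String → Bool) (m : Int) : List String → List String
  | [] => []
  | l :: rest =>
    if hf : f l = true then
      (if (((l :: rest).takeWhile f).length : Int) < m then (l :: rest).takeWhile f else []) ++
        pvCore f m ((l :: rest).dropWhile f)
    else l :: pvCore f m rest
termination_by ls => ls.length
decreasing_by
  · simp only [List.dropWhile_cons, hf, if_pos]
    exact Nat.lt_succ_of_le (List.length_dropWhile_le f rest)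
  · simp

theorem pvCore_eq (f : String → Bool) (m : Int) (ls : List String) :
    pvCore f m ls =
      (if ((ls.takeWhile f).length : Int) < m then ls.takeWhile f else []) ++
        pvCore f m (ls.dropWhile f) := by
  cases ls with
  | nil => simp [pvCore]
  | cons l rest =>
    by_cases hf : f l = true
    · rw [pvCore, dif_pos hf]
    · rw [pvCore, dif_neg hf]
      simp [hf, pvCore]

theorem pvSkip_map_eq (lines : List String) (f : String → Bool) (i : Nat) (hi : i ≤ lines.length) :
    pvSkip (lines.map f) i = i + ((lines.drop i).takeWhile f).length := by
  rcases Nat.lt_or_ge i lines.length with h | h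
  · have hget : (lines.map f).getD i false = f lines[i] := by
      simp [List.getD, List.getElem?_map, List.getElem?_eq_getElem h]
    have hdrop : lines.drop i = lines[i] :: lines.drop (i + 1) :=
      List.drop_eq_getElem_cons h
    by_cases hf : f lines[i] = true
    · rw [pvSkip, if_pos ⟨by simpa using h, by rw [hget]; exact hf⟩]
      rw [pvSkip_map_eq lines f (i + 1) (by omega)]
      rw [hdrop, List.takeWhile_cons, hf]
      simp; omega
    · rw [pvSkip, if_neg (by rw [hget]; tauto)]
      rw [hdrop, List.takeWhile_cons]
      simp [hf]
  · have : i = lines.length := by omega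
    subst this
    rw [pvSkip, if_neg (by simp)]
    simp
termination_by lines.length - i
decreasing_by omega

theorem pvALoop_eq (lines : List String) (f : String → Bool) (m : Int)
    (i : Nat) (out : List String) (hi : i ≤ lines.length) :
    pvALoop lines (lines.map f) m i out = out ++ pvCore f m (lines.drop i) := by
  rcases Nat.lt_or_ge i lines.length with h | h
  · have hget : (lines.map f).getD i false = f lines[i] := by
      simp [List.getD, List.getElem?_map, List.getElem?_eq_getElem h]
    have hdrop : lines.drop i = lines[i] :: lines.drop (i + 1) :=
      List.drop_eq_getElem_cons h
    by_cases hf : f lines[i] = true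
    · -- duplicate run
      rw [pvALoop, dif_pos h, dif_pos (by rw [hget]; exact hf)]
      have hskip : pvSkip (lines.map f) i = i + ((lines.drop i).takeWhile f).length :=
        pvSkip_map_eq lines f i hi
      have htpre : (lines.drop i).takeWhile f <+: lines.drop i := List.takeWhile_prefix f
      have hslice : PySem.List.slice lines (some (i : Int))
          (some ((i + ((lines.drop i).takeWhile f).length : Nat) : Int))
          = (lines.drop i).takeWhile f := by
        rw [PySem.List.slice_natCast]
        have h2 : i + ((lines.drop i).takeWhile f).length - i
            = ((lines.drop i).takeWhile f).length := by omega
        rw [h2]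
        exact (List.prefix_iff_eq_take.mp htpre).symm
      have hdw : (lines.drop i).dropWhile f
          = lines.drop (i + ((lines.drop i).takeWhile f).length) := by
        rw [pvDropWhile_eq_drop, List.drop_drop, Nat.add_comm]
      rw [hskip, hslice]
      have hlen : (i + ((lines.drop i).takeWhile f).length) - i
          = ((lines.drop i).takeWhile f).length := by omega
      rw [hlen]
      have htle : ((lines.drop i).takeWhile f).length ≤ lines.length - i := by
        have := htpre.length_le
        simp only [List.length_drop] at this
        omega
      rw [pvALoop_eq lines f m (i + ((lines.drop i).takeWhile f).length) _ (by omega)]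
      conv_rhs => rw [hdrop, pvCore, dif_pos hf, ← hdrop]
      rw [hdw]
      by_cases hc : ((((lines.drop i).takeWhile f).length : Nat) : Int) < m <;>
        simp [hc, List.append_assoc]
    · -- single non-duplicate line
      rw [pvALoop, dif_pos h, dif_neg (by rw [hget]; simp [hf])]
      rw [pvALoop_eq lines f m (i + 1) _ (by omega)]
      conv_rhs => rw [hdrop, pvCore, dif_neg hf]
      simp
  · have h0 : i = lines.length := by omega
    subst h0
    rw [pvALoop, dif_neg (by omega)]
    simp [pvCore]
termination_by lines.length - i
decreasing_by
  · have hgt := pvSkip_gt (lines.map f) i (by rw [hget]; exact hf)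
    rw [hskip] at hgt
    omega
  · omega

theorem pvBLoop_eq (prev : PySem.Set String) (m : Int) (ls run out : List String) :
    pvBLoop prev m out run ls =
      out ++
        (if ((run.length + (ls.takeWhile (fun l => PySem.Set.contains prev (pvNorm l))).length : Nat) : Int) < m
          then run ++ ls.takeWhile (fun l => PySem.Set.contains prev (pvNorm l)) else []) ++
        pvCore (fun l => PySem.Set.contains prev (pvNorm l)) m
          (ls.dropWhile (fun l => PySem.Set.contains prev (pvNorm l))) := by
  induction ls generalizing run out with
  | nil =>
    simp only [pvBLoop, List.takeWhile_nil, List.dropWhile_nil, pvCore]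
    by_cases hc : (run.length : Int) < m <;> simp [hc]
  | cons l rest ih =>
    by_cases hf : PySem.Set.contains prev (pvNorm l) = true
    · rw [pvBLoop, if_pos hf, ih]
      rw [List.takeWhile_cons, List.dropWhile_cons]
      simp only [hf, if_true]
      have hn : (run ++ [l]).length
            + (rest.takeWhile (fun l => PySem.Set.contains prev (pvNorm l))).length
          = run.length
            + (l :: rest.takeWhile (fun l => PySem.Set.contains prev (pvNorm l))).length := by
        simp; omega
      rw [hn]
      have hl2 : (run ++ [l]) ++ rest.takeWhile (fun l => PySem.Set.contains prev (pvNorm l))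
          = run ++ l :: rest.takeWhile (fun l => PySem.Set.contains prev (pvNorm l)) := by
        simp
      rw [hl2]
    · have hf' : PySem.Set.contains prev (pvNorm l) = false := by simpa using hf
      rw [pvBLoop, if_neg hf, ih]
      rw [List.takeWhile_cons, List.dropWhile_cons]
      simp only [hf', Bool.false_eq_true, if_false]
      conv_rhs => rw [pvCore, dif_neg hf]
      rw [pvCore_eq (fun l => PySem.Set.contains prev (pvNorm l)) m rest]
      by_cases hc : (run.length : Int) < m <;> simp [hc, List.append_assoc]

-- ===== VERDICT (by name: the statement is the Claim_ definition above) =====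
theorem dedup_against_previous_py_spec : Claim_equal_dedup_against_previous_py := by
  intro body previous_bodies m _
  unfold Spec_dedup_against_previous_py
  unfold dedup_against_previous_py dedup_against_previous_py_alt
  by_cases h : body = "" ∨ previous_bodies = []
  · simp [h]
  · rw [if_neg h, if_neg h]
    apply congrArg
    apply congrArg
    rw [pvALoop_eq (pvSplitNL body)
      (fun line => PySem.Set.contains (pvPrevLines previous_bodies) (pvNorm line)) m 0 []
      (by omega)]
    rw [pvBLoop_eq (pvPrevLines previous_bodies) m (pvSplitNL body) [] []]
    simp only [List.length_nil, Nat.zero_add, List.nil_append]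
    rw [← pvCore_eq]
    simp
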